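-- pv_equiv track=rewrite | github.com/Justmilomb/StockMarketAI | data_loader.py | _clean_ticker
-- ===== SOURCE A (Python) =====
-- def _clean_ticker(ticker: str) -> str:
--     """
--     Remove Trading 212 internal suffixes like _US_EQ, _GB_EQ, etc.
--     that yfinance cannot resolve.
--     """
--     suffixes = [
--         "_US_EQ", "_GB_EQ", "_UK_EQ", "_DE_EQ", "_FR_EQ", "_IL_EQ",
--         "_UK", "_DE", "_FR", "_IL", "_NL_EQ", "_ES_EQ", "_IT_EQ",
--         "_CH_EQ", "_SE_EQ", "_NO_EQ", "_DK_EQ", "_FI_EQ",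
--         "_EQ",  # catch-all for remaining _EQ suffixes — MUST be last
--     ]
--     cleaned = ticker.upper().strip()
--     for s in suffixes:
--         if cleaned.endswith(s):
--             cleaned = cleaned[: -len(s)]
--             break
--     return cleaned
-- ===== SOURCE B (Python) =====
-- # B: decompose the suffix table into its structure: one "_EQ" check, then a
-- # single endswith over the 3-char country codes (endswith accepts a tuple),
-- # instead of scanning 19 suffixes in order.
--
-- _COUNTRY = ("_US", "_GB", "_UK", "_DE", "_FR", "_IL",
--             "_NL", "_ES", "_IT", "_CH", "_SE", "_NO", "_DK", "_FI")
-- _BARE = ("_UK", "_DE", "_FR", "_IL")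
--
--
-- def _clean_ticker(ticker: str) -> str:
--     t = ticker.upper().strip()
--     if t.endswith("_EQ"):
--         head = t[:-3]
--         return head[:-3] if head.endswith(_COUNTRY) else head
--     if t.endswith(_BARE):
--         return t[:-3]
--     return t
-- ===== Notes on version B (the rewrite author's own statement) =====
-- stated objective: idiomatic
-- what changed: A scans an ordered table of 19 suffixes and strips the first match; B decomposes the table's structure into a single catch-all-suffix check followed by one tuple-endswith over the 3-char country codes (and one over the bare codes), stripping 3 characters at a time.
import Mathlib
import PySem

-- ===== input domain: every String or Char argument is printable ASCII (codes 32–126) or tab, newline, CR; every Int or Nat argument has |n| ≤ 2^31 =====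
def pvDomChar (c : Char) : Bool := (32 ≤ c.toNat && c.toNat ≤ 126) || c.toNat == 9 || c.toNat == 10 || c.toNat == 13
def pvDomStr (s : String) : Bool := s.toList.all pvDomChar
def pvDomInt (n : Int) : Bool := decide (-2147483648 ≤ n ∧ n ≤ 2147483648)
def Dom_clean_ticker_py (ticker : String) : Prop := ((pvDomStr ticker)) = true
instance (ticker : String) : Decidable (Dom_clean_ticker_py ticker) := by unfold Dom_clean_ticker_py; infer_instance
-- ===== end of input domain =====

-- B replaces A's ordered 19-suffix scan by one "_EQ" check plus a single tuple-endswith over the 3-char country codes (idiomatic; same cost).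


-- ===== PORT A =====
-- A's suffix list, in A's order
def pvSuffixesA : List String :=
  ["_US_EQ", "_GB_EQ", "_UK_EQ", "_DE_EQ", "_FR_EQ", "_IL_EQ",
   "_UK", "_DE", "_FR", "_IL", "_NL_EQ", "_ES_EQ", "_IT_EQ",
   "_CH_EQ", "_SE_EQ", "_NO_EQ", "_DK_EQ", "_FI_EQ",
   "_EQ"]

-- 'for s in suffixes: if cleaned.endswith(s): cleaned = cleaned[:-len(s)]; break; return cleaned'
def pvStripFirst : List String → String → String
  | [], cleaned => cleaned
  | s :: rest, cleaned =>
      if PySem.Str.endswith cleaned s then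
        PySem.Str.slice cleaned none (some (-(PySem.Str.len s)))
      else pvStripFirst rest cleaned


def clean_ticker_py (ticker : String) : String :=
  pvStripFirst pvSuffixesA (PySem.Str.strip (PySem.Str.upper ticker))

-- ===== PORT B =====
def pvCountry : List String :=
  ["_US", "_GB", "_UK", "_DE", "_FR", "_IL",
   "_NL", "_ES", "_IT", "_CH", "_SE", "_NO", "_DK", "_FI"]
def pvBare : List String := ["_UK", "_DE", "_FR", "_IL"]


def clean_ticker_py_alt (ticker : String) : String :=
  let t := PySem.Str.strip (PySem.Str.upper ticker)
  if PySem.Str.endswith t "_EQ" then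
    let head := PySem.Str.slice t none (some (-3))
    -- head.endswith(_COUNTRY): Python endswith with a tuple = any of its members
    if pvCountry.any (fun p => PySem.Str.endswith head p) then
      PySem.Str.slice head none (some (-3))
    else head
  else if pvBare.any (fun p => PySem.Str.endswith t p) then
    PySem.Str.slice t none (some (-3))
  else t

-- ===== PRECONDITION & SPEC =====
def Spec_clean_ticker_py (ticker : String) (out : String) : Prop := out = clean_ticker_py_alt ticker
instance (ticker : String) (out : String) : Decidable (Spec_clean_ticker_py ticker out) := by unfold Spec_clean_ticker_py; infer_instance

-- ===== CLAIM (what is proved, stated in full; the proofs are below) =====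
def Claim_equal_clean_ticker_py : Prop := ∀ (ticker : String), Dom_clean_ticker_py ticker → Spec_clean_ticker_py ticker (clean_ticker_py ticker)

-- ===== LEMMAS AND PROOFS =====

theorem pv_append_suffix_iff (a b l : List Char) :
    (a ++ b) <:+ l ↔ b <:+ l ∧ a <:+ l.take (l.length - b.length) := by
  constructor
  · rintro ⟨u, hu⟩
    subst hu
    refine ⟨⟨u ++ a, by simp⟩, ?_⟩
    have h1 : ((u ++ a) ++ b).length - b.length = (u ++ a).length := by simp; omega
    rw [← List.append_assoc, h1, List.take_left]
    exact ⟨u, rfl⟩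
  · rintro ⟨⟨v, hv⟩, ha⟩
    subst hv
    have h1 : (v ++ b).length - b.length = v.length := by simp
    rw [h1, List.take_left] at ha
    obtain ⟨w, hw⟩ := ha
    exact ⟨w, by rw [← hw]; simp⟩

theorem pv_suffix_unique {l a b : List Char} (ha : a <:+ l) (hb : b <:+ l)
    (hlen : a.length = b.length) : a = b := by
  rw [List.suffix_iff_eq_drop] at ha hb
  rw [ha, hb, hlen]

-- endswith on a 6-char "_XX_EQ" suffix splits into the "_EQ" check and a country check on t[:-3]
theorem pv_endswith_split (c p6 p3 : String) (h : p6.toList = p3.toList ++ ['_','E','Q']) :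
    PySem.Str.endswith c p6
      = (PySem.Str.endswith c "_EQ" && PySem.Str.endswith (PySem.Str.slice c none (some (-3))) p3) := by
  rw [Bool.eq_iff_iff]
  simp only [Bool.and_eq_true, PySem.Str.endswith_eq, PySem.Chars.endswith_iff, PySem.Str.toList_slice,
    PySem.Chars.slice_eq_listSlice]
  rw [PySem.List.slice_to_neg_ofNat c.toList 3 (by omega), h]
  have : ("_EQ".toList : List Char) = ['_','E','Q'] := by decide
  rw [this]
  exact pv_append_suffix_iff _ _ _

-- two distinct 3-char suffixes cannot both end a string
theorem pv_ends3_excl (c p q : String) (hp : p.toList.length = 3) (hq : q.toList.length = 3)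
    (hne : p.toList ≠ q.toList) (h : PySem.Str.endswith c p = true) :
    PySem.Str.endswith c q = false := by
  rw [PySem.Str.endswith_eq, PySem.Chars.endswith_iff] at h
  rw [PySem.Str.endswith_eq, ← Bool.not_eq_true, PySem.Chars.endswith_iff]
  intro hq'
  exact hne (pv_suffix_unique h hq' (by rw [hp, hq]))

theorem pv_slice6 (c : String) :
    PySem.Str.slice c none (some (-6))
      = PySem.Str.slice (PySem.Str.slice c none (some (-3))) none (some (-3)) := by
  apply String.toList_inj.mp
  simp only [PySem.Str.toList_slice, PySem.Chars.slice_eq_listSlice]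
  rw [PySem.List.slice_to_neg_ofNat c.toList 6 (by omega),
      PySem.List.slice_to_neg_ofNat c.toList 3 (by omega),
      PySem.List.slice_to_neg_ofNat _ 3 (by omega)]
  rw [List.length_take, List.take_take]
  congr 1
  omega


theorem pv_main (c : String) :
    pvStripFirst pvSuffixesA c =
      (if PySem.Str.endswith c "_EQ" then
        (if pvCountry.any (fun p => PySem.Str.endswith (PySem.Str.slice c none (some (-3))) p) then
          PySem.Str.slice (PySem.Str.slice c none (some (-3))) none (some (-3))
        else PySem.Str.slice c none (some (-3)))
      else if pvBare.any (fun p => PySem.Str.endswith c p) then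
        PySem.Str.slice c none (some (-3))
      else c) := by
  have eUS := pv_endswith_split c "_US_EQ" "_US" (by decide)
  have eGB := pv_endswith_split c "_GB_EQ" "_GB" (by decide)
  have eUK := pv_endswith_split c "_UK_EQ" "_UK" (by decide)
  have eDE := pv_endswith_split c "_DE_EQ" "_DE" (by decide)
  have eFR := pv_endswith_split c "_FR_EQ" "_FR" (by decide)
  have eIL := pv_endswith_split c "_IL_EQ" "_IL" (by decide)
  have eNL := pv_endswith_split c "_NL_EQ" "_NL" (by decide)
  have eES := pv_endswith_split c "_ES_EQ" "_ES" (by decide)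
  have eIT := pv_endswith_split c "_IT_EQ" "_IT" (by decide)
  have eCH := pv_endswith_split c "_CH_EQ" "_CH" (by decide)
  have eSE := pv_endswith_split c "_SE_EQ" "_SE" (by decide)
  have eNO := pv_endswith_split c "_NO_EQ" "_NO" (by decide)
  have eDK := pv_endswith_split c "_DK_EQ" "_DK" (by decide)
  have eFI := pv_endswith_split c "_FI_EQ" "_FI" (by decide)
  have lUS : -(PySem.Str.len "_US_EQ") = (-6 : Int) := by decide
  have lGB : -(PySem.Str.len "_GB_EQ") = (-6 : Int) := by decide
  have lUK : -(PySem.Str.len "_UK_EQ") = (-6 : Int) := by decide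
  have lDE : -(PySem.Str.len "_DE_EQ") = (-6 : Int) := by decide
  have lFR : -(PySem.Str.len "_FR_EQ") = (-6 : Int) := by decide
  have lIL : -(PySem.Str.len "_IL_EQ") = (-6 : Int) := by decide
  have lNL : -(PySem.Str.len "_NL_EQ") = (-6 : Int) := by decide
  have lES : -(PySem.Str.len "_ES_EQ") = (-6 : Int) := by decide
  have lIT : -(PySem.Str.len "_IT_EQ") = (-6 : Int) := by decide
  have lCH : -(PySem.Str.len "_CH_EQ") = (-6 : Int) := by decide
  have lSE : -(PySem.Str.len "_SE_EQ") = (-6 : Int) := by decide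
  have lNO : -(PySem.Str.len "_NO_EQ") = (-6 : Int) := by decide
  have lDK : -(PySem.Str.len "_DK_EQ") = (-6 : Int) := by decide
  have lFI : -(PySem.Str.len "_FI_EQ") = (-6 : Int) := by decide
  have mUK : -(PySem.Str.len "_UK") = (-3 : Int) := by decide
  have mDE : -(PySem.Str.len "_DE") = (-3 : Int) := by decide
  have mFR : -(PySem.Str.len "_FR") = (-3 : Int) := by decide
  have mIL : -(PySem.Str.len "_IL") = (-3 : Int) := by decide
  have mEQ : -(PySem.Str.len "_EQ") = (-3 : Int) := by decide
  simp only [pvStripFirst, pvSuffixesA, eUS, eGB, eUK, eDE, eFR, eIL, eNL, eES, eIT, eCH, eSE, eNO, eDK, eFI, lUS, lGB, lUK, lDE, lFR, lIL, lNL, lES, lIT, lCH, lSE, lNO, lDK, lFI, mUK, mDE, mFR, mIL, mEQ]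
  by_cases hEQ : PySem.Str.endswith c "_EQ"
  case neg =>
    simp only [hEQ, pvBare, List.any_cons, List.any_nil, Bool.false_and, Bool.false_eq_true, if_false, Bool.or_false]
    simp only [PySem.Str.endswith_eq]
    by_cases hUK : PySem.Chars.endswith c.toList ['_', 'U', 'K'] = true
    · simp [hUK]
    by_cases hDE : PySem.Chars.endswith c.toList ['_', 'D', 'E'] = true
    · simp [hUK, hDE]
    by_cases hFR : PySem.Chars.endswith c.toList ['_', 'F', 'R'] = true
    · simp [hUK, hDE, hFR]
    by_cases hIL : PySem.Chars.endswith c.toList ['_', 'I', 'L'] = true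
    · simp [hUK, hDE, hFR, hIL]
    simp [hUK, hDE, hFR, hIL]
  case pos =>
    have bUK : PySem.Str.endswith c "_UK" = false := pv_ends3_excl c "_EQ" "_UK" (by decide) (by decide) (by decide) hEQ
    have bDE : PySem.Str.endswith c "_DE" = false := pv_ends3_excl c "_EQ" "_DE" (by decide) (by decide) (by decide) hEQ
    have bFR : PySem.Str.endswith c "_FR" = false := pv_ends3_excl c "_EQ" "_FR" (by decide) (by decide) (by decide) hEQ
    have bIL : PySem.Str.endswith c "_IL" = false := pv_ends3_excl c "_EQ" "_IL" (by decide) (by decide) (by decide) hEQ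
    simp only [hEQ, Bool.true_and, bUK, bDE, bFR, bIL, Bool.false_eq_true, if_false, if_true, pv_slice6, pvCountry, List.any_cons, List.any_nil, Bool.or_false]
    simp only [PySem.Str.endswith_eq, PySem.Str.toList_slice, PySem.Chars.slice_eq_listSlice]
    by_cases hUS : PySem.Chars.endswith (PySem.List.slice c.toList none (some (-3))) ['_', 'U', 'S'] = true
    · simp [hUS]
    by_cases hGB : PySem.Chars.endswith (PySem.List.slice c.toList none (some (-3))) ['_', 'G', 'B'] = true
    · simp [hUS, hGB]
    by_cases hUK : PySem.Chars.endswith (PySem.List.slice c.toList none (some (-3))) ['_', 'U', 'K'] = true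
    · simp [hUS, hGB, hUK]
    by_cases hDE : PySem.Chars.endswith (PySem.List.slice c.toList none (some (-3))) ['_', 'D', 'E'] = true
    · simp [hUS, hGB, hUK, hDE]
    by_cases hFR : PySem.Chars.endswith (PySem.List.slice c.toList none (some (-3))) ['_', 'F', 'R'] = true
    · simp [hUS, hGB, hUK, hDE, hFR]
    by_cases hIL : PySem.Chars.endswith (PySem.List.slice c.toList none (some (-3))) ['_', 'I', 'L'] = true
    · simp [hUS, hGB, hUK, hDE, hFR, hIL]
    by_cases hNL : PySem.Chars.endswith (PySem.List.slice c.toList none (some (-3))) ['_', 'N', 'L'] = true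
    · simp [hUS, hGB, hUK, hDE, hFR, hIL, hNL]
    by_cases hES : PySem.Chars.endswith (PySem.List.slice c.toList none (some (-3))) ['_', 'E', 'S'] = true
    · simp [hUS, hGB, hUK, hDE, hFR, hIL, hNL, hES]
    by_cases hIT : PySem.Chars.endswith (PySem.List.slice c.toList none (some (-3))) ['_', 'I', 'T'] = true
    · simp [hUS, hGB, hUK, hDE, hFR, hIL, hNL, hES, hIT]
    by_cases hCH : PySem.Chars.endswith (PySem.List.slice c.toList none (some (-3))) ['_', 'C', 'H'] = true
    · simp [hUS, hGB, hUK, hDE, hFR, hIL, hNL, hES, hIT, hCH]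
    by_cases hSE : PySem.Chars.endswith (PySem.List.slice c.toList none (some (-3))) ['_', 'S', 'E'] = true
    · simp [hUS, hGB, hUK, hDE, hFR, hIL, hNL, hES, hIT, hCH, hSE]
    by_cases hNO : PySem.Chars.endswith (PySem.List.slice c.toList none (some (-3))) ['_', 'N', 'O'] = true
    · simp [hUS, hGB, hUK, hDE, hFR, hIL, hNL, hES, hIT, hCH, hSE, hNO]
    by_cases hDK : PySem.Chars.endswith (PySem.List.slice c.toList none (some (-3))) ['_', 'D', 'K'] = true
    · simp [hUS, hGB, hUK, hDE, hFR, hIL, hNL, hES, hIT, hCH, hSE, hNO, hDK]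
    by_cases hFI : PySem.Chars.endswith (PySem.List.slice c.toList none (some (-3))) ['_', 'F', 'I'] = true
    · simp [hUS, hGB, hUK, hDE, hFR, hIL, hNL, hES, hIT, hCH, hSE, hNO, hDK, hFI]
    simp [hUS, hGB, hUK, hDE, hFR, hIL, hNL, hES, hIT, hCH, hSE, hNO, hDK, hFI]

-- ===== VERDICT (by name: the statement is the Claim_ definition above) =====
theorem clean_ticker_py_spec : Claim_equal_clean_ticker_py := by
  intro ticker _
  unfold Spec_clean_ticker_py clean_ticker_py clean_ticker_py_alt
  exact pv_main _
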